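-- pv_equiv track=rewrite | github.com/nickzoic/models3d | maze/make_cube.py | make_mesh
-- ===== SOURCE A (Python) =====
-- def make_mesh(nx, ny, nz):
--
--     def number(x,y,z):
--         return z * ny * nx + y * nx + x
--
--     mesh = dict()
--
--     for x in range(0, nx):
--         for y in range(0, ny):
--             for z in range(0, nz):
--                 nn = set()
--                 if x > 0: nn.add(number(x-1,y,z))
--                 if x < nx-1: nn.add(number(x+1,y,z))
--                 if y > 0: nn.add(number(x,y-1,z))
--                 if y < ny-1: nn.add(number(x,y+1,z))
--                 if z > 0: nn.add(number(x,y,z-1))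
--                 if z < nz-1: nn.add(number(x,y,z+1))
--                 mesh[number(x,y,z)] = nn
--
--     return mesh
-- ===== SOURCE B (Python) =====
-- def make_mesh(nx, ny, nz):
--     # The 3D grid graph is the Cartesian product of three path graphs.
--     # Build the adjacency dimension by dimension: start from a single cell,
--     # then take the product with a path of nx cells (stride 1), ny cells
--     # (stride nx) and nz cells (stride nx*ny).  Each product step shifts the
--     # existing neighbor lists into every layer and links consecutive layers.
--     def product(sub, m, stride):
--         out = {}
--         for u, nbrs in sub.items():
--             for k in range(m):
--                 lst = [v + stride * k for v in nbrs]
--                 if k > 0: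
--                     lst.append(u + stride * (k - 1))
--                 if k < m - 1:
--                     lst.append(u + stride * (k + 1))
--                 out[u + stride * k] = lst
--         return out
--
--     if nx <= 0 or ny <= 0 or nz <= 0:
--         return {}
--     mesh = {0: []}
--     mesh = product(mesh, nx, 1)
--     mesh = product(mesh, ny, nx)
--     mesh = product(mesh, nz, nx * ny)
--     return {n: set(lst) for n, lst in mesh.items()}
-- ===== Notes on version B (the rewrite author's own statement) =====
-- stated objective: alternative
-- what changed: Builds the grid adjacency as an iterated graph Cartesian product with path graphs (0D cell -> x-path -> y-path -> z-path), each product step shifting existing neighbor lists into layers and linking consecutive layers, instead of a triple nested coordinate loop computing six neighbors per cell.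
import Mathlib
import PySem

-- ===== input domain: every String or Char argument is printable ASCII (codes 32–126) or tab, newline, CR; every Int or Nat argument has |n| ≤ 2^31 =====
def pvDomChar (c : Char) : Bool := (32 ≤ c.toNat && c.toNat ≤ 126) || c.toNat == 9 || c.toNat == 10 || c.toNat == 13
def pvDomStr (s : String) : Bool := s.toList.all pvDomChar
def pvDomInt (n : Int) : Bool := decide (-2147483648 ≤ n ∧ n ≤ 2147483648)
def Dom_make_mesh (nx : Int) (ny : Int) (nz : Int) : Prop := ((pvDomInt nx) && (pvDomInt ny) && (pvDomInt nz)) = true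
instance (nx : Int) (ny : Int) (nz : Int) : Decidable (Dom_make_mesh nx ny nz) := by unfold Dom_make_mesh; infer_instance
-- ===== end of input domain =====

-- B builds the grid adjacency as an iterated graph Cartesian product with path graphs
-- (single cell -> x-path -> y-path -> z-path) instead of A's triple nested coordinate
-- loop computing six neighbors per cell (objective: alternative algorithm, same cost).

-- ===== PORT A =====
-- A's nested helper 'number'
def pvNumber (nx ny x y z : Int) : Int := z * ny * nx + y * nx + x

def make_mesh (nx : Int) (ny : Int) (nz : Int) : List (Int × List Int) :=
  ((PySem.List.pyRange 0 nx 1).foldl (fun mesh x =>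
    (PySem.List.pyRange 0 ny 1).foldl (fun mesh y =>
      (PySem.List.pyRange 0 nz 1).foldl (fun mesh z =>
        let nn : PySem.Set Int := PySem.Set.empty
        let nn := if x > 0 then PySem.Set.add nn (pvNumber nx ny (x-1) y z) else nn
        let nn := if x < nx - 1 then PySem.Set.add nn (pvNumber nx ny (x+1) y z) else nn
        let nn := if y > 0 then PySem.Set.add nn (pvNumber nx ny x (y-1) z) else nn
        let nn := if y < ny - 1 then PySem.Set.add nn (pvNumber nx ny x (y+1) z) else nn
        let nn := if z > 0 then PySem.Set.add nn (pvNumber nx ny x y (z-1)) else nn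
        let nn := if z < nz - 1 then PySem.Set.add nn (pvNumber nx ny x y (z+1)) else nn
        mesh.insert (pvNumber nx ny x y z) nn) mesh) mesh)
    (PySem.Dict.empty : PySem.Dict Int (List Int))).items

-- ===== PORT B =====
-- Source B's inner helper 'product(sub, m, stride)'
def pvProduct (sub : PySem.Dict Int (List Int)) (m : Int) (stride : Int) :
    PySem.Dict Int (List Int) :=
  sub.items.foldl (fun out p =>
    (PySem.List.pyRange 0 m 1).foldl (fun out k =>
      let lst := p.2.map (fun v => v + stride * k)
      let lst := if k > 0 then lst ++ [p.1 + stride * (k - 1)] else lst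
      let lst := if k < m - 1 then lst ++ [p.1 + stride * (k + 1)] else lst
      out.insert (p.1 + stride * k) lst) out) PySem.Dict.empty

def make_mesh_alt (nx : Int) (ny : Int) (nz : Int) : List (Int × List Int) :=
  if nx ≤ 0 ∨ ny ≤ 0 ∨ nz ≤ 0 then (PySem.Dict.empty : PySem.Dict Int (List Int)).items
  else
  let mesh := (PySem.Dict.empty : PySem.Dict Int (List Int)).insert 0 []
  let mesh := pvProduct mesh nx 1
  let mesh := pvProduct mesh ny nx
  let mesh := pvProduct mesh nz (nx * ny)
  -- final dict comprehension {n: set(lst) for n, lst in mesh.items()}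
  (mesh.items.foldl (fun d p => d.insert p.1 (PySem.Set.ofList p.2))
    (PySem.Dict.empty : PySem.Dict Int (List Int))).items

-- ===== PRECONDITION & SPEC =====
def Spec_make_mesh (nx : Int) (ny : Int) (nz : Int) (out : List (Int × List Int)) : Prop := out = make_mesh_alt nx ny nz
instance (nx : Int) (ny : Int) (nz : Int) (out : List (Int × List Int)) : Decidable (Spec_make_mesh nx ny nz out) := by unfold Spec_make_mesh; infer_instance

-- ===== CLAIM (what is proved, stated in full; the proofs are below) =====
def Claim_equal_make_mesh : Prop := ∀ (nx : Int) (ny : Int) (nz : Int), Dom_make_mesh nx ny nz → Spec_make_mesh nx ny nz (make_mesh nx ny nz)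

-- ===== LEMMAS AND PROOFS =====

-- common fold step: insert one (key, value) pair
def pvIns (d : PySem.Dict Int (List Int)) (p : Int × List Int) : PySem.Dict Int (List Int) :=
  d.insert p.1 p.2

-- the neighbor set A builds for cell (x,y,z)
def pvCell (nx ny nz x y z : Int) : List Int :=
  let nn : PySem.Set Int := PySem.Set.empty
  let nn := if x > 0 then PySem.Set.add nn (pvNumber nx ny (x-1) y z) else nn
  let nn := if x < nx - 1 then PySem.Set.add nn (pvNumber nx ny (x+1) y z) else nn
  let nn := if y > 0 then PySem.Set.add nn (pvNumber nx ny x (y-1) z) else nn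
  let nn := if y < ny - 1 then PySem.Set.add nn (pvNumber nx ny x (y+1) z) else nn
  let nn := if z > 0 then PySem.Set.add nn (pvNumber nx ny x y (z-1)) else nn
  let nn := if z < nz - 1 then PySem.Set.add nn (pvNumber nx ny x y (z+1)) else nn
  nn

-- the (key, list) pair one product step makes from submesh entry (u, nb) at layer k
def pvEntry (u : Int) (nb : List Int) (m stride k : Int) : Int × List Int :=
  (u + stride * k,
    (let lst := nb.map (fun v => v + stride * k)
     let lst := if k > 0 then lst ++ [u + stride * (k - 1)] else lst
     if k < m - 1 then lst ++ [u + stride * (k + 1)] else lst))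

@[simp] lemma pvEntry_fst (u : Int) (nb : List Int) (m stride k : Int) :
    (pvEntry u nb m stride k).1 = u + stride * k := rfl

-- A's per-cell neighbor additions, written as one list of guarded singletons
def pvCanon (nx ny nz x y z : Int) : List Int :=
  (if x > 0 then [pvNumber nx ny (x-1) y z] else []) ++
  (if x < nx - 1 then [pvNumber nx ny (x+1) y z] else []) ++
  (if y > 0 then [pvNumber nx ny x (y-1) z] else []) ++
  (if y < ny - 1 then [pvNumber nx ny x (y+1) z] else []) ++
  (if z > 0 then [pvNumber nx ny x y (z-1)] else []) ++
  (if z < nz - 1 then [pvNumber nx ny x y (z+1)] else [])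

lemma pvA_shape (nx ny nz : Int) :
    make_mesh nx ny nz =
      (((PySem.List.pyRange 0 nx 1).flatMap (fun x =>
        (PySem.List.pyRange 0 ny 1).flatMap (fun y =>
          (PySem.List.pyRange 0 nz 1).map (fun z =>
            (pvNumber nx ny x y z, pvCell nx ny nz x y z))))).foldl pvIns
        (PySem.Dict.empty : PySem.Dict Int (List Int))).items := by
  simp only [List.foldl_flatMap, List.foldl_map]
  rfl

lemma pvProduct_shape (sub : PySem.Dict Int (List Int)) (m stride : Int) :
    pvProduct sub m stride =
      (sub.items.flatMap (fun p =>
        (PySem.List.pyRange 0 m 1).map (pvEntry p.1 p.2 m stride))).foldl pvIns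
        (PySem.Dict.empty : PySem.Dict Int (List Int)) := by
  simp only [List.foldl_flatMap, List.foldl_map]
  rfl

-- items of a fresh-key insertion fold (specialised items_foldl_insert_fresh)
lemma pv_items_foldl (L : List (Int × List Int)) (h : (L.map Prod.fst).Nodup) :
    (L.foldl pvIns (PySem.Dict.empty : PySem.Dict Int (List Int))).items = L := by
  have := PySem.Dict.items_foldl_insert_fresh L Prod.fst Prod.snd
    (PySem.Dict.empty : PySem.Dict Int (List Int))
    (fun a _ => PySem.Dict.contains_empty a.1) h
  simpa [pvIns] using this

lemma pv_items_foldl_conv (L : List (Int × List Int)) (h : (L.map Prod.fst).Nodup) :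
    ((L.foldl (fun d p => d.insert p.1 (PySem.Set.ofList p.2))
      (PySem.Dict.empty : PySem.Dict Int (List Int))).items) =
      L.map (fun p => (p.1, PySem.Set.ofList p.2)) := by
  have := PySem.Dict.items_foldl_insert_fresh L Prod.fst
    (fun p => PySem.Set.ofList p.2)
    (PySem.Dict.empty : PySem.Dict Int (List Int))
    (fun a _ => PySem.Dict.contains_empty a.1) h
  simpa using this

-- pyRange 0 n 1 as a mapped Nat range, for every n
lemma pv_pyRange_toNat (n : Int) :
    PySem.List.pyRange 0 n 1 = List.map (fun k : Nat => (k : Int)) (List.range n.toNat) := by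
  by_cases h : n ≤ 0
  · rw [PySem.List.pyRange_one_eq_nil h]
    have : n.toNat = 0 := by omega
    simp [this]
  · have h2 : n = ((n.toNat : Nat) : Int) := by omega
    calc PySem.List.pyRange 0 n 1
        = PySem.List.pyRange 0 ((n.toNat : Nat) : Int) 1 := by rw [← h2]
      _ = List.map (fun k : Nat => (k : Int)) (List.range n.toNat) :=
          PySem.List.pyRange_zero_natCast n.toNat

lemma pv_app_ite (c : Prop) [Decidable c] (l : List Int) (a : Int) :
    (if c then l ++ [a] else l) = l ++ (if c then [a] else []) := by
  split_ifs <;> simp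

-- distinct keys of one 'stratified' product pass, Nat side
lemma pv_nodup_scale (a : Nat) (L : List Nat) (hL : L.Nodup) :
    ((List.range a).flatMap (fun i => L.map (fun t => i + a * t))).Nodup := by
  rw [List.nodup_flatMap]
  constructor
  · intro i hi
    have ha : 0 < a := by simp only [List.mem_range] at hi; omega
    exact hL.map (fun t1 t2 h => by
      have : a * t1 = a * t2 := by omega
      exact Nat.eq_of_mul_eq_mul_left ha this)
  · refine List.pairwise_lt_range.imp_of_mem ?_
    intro i1 i2 h1 h2 hlt
    simp only [List.mem_range] at h1 h2
    intro w hw1 hw2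
    simp only [List.mem_map] at hw1 hw2
    obtain ⟨t1, _, e1⟩ := hw1
    obtain ⟨t2, _, e2⟩ := hw2
    have m1 : w % a = i1 := by rw [← e1, Nat.add_mul_mod_self_left, Nat.mod_eq_of_lt h1]
    have m2 : w % a = i2 := by rw [← e2, Nat.add_mul_mod_self_left, Nat.mod_eq_of_lt h2]
    omega

def pvG2 (a b : Nat) : List Nat :=
  (List.range a).flatMap (fun i => (List.range b).map (fun j => i + a * j))

lemma pv_nodup_g2 (a b : Nat) : (pvG2 a b).Nodup := pv_nodup_scale a _ List.nodup_range

lemma pv_nodup_g3 (a b c : Nat) :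
    ((List.range a).flatMap (fun i => (pvG2 b c).map (fun t => i + a * t))).Nodup :=
  pv_nodup_scale a _ (pv_nodup_g2 b c)

-- A's set-building chain is the ofList of the guarded-singleton list
lemma pvCell_eq_ofList (nx ny nz x y z : Int) :
    pvCell nx ny nz x y z = PySem.Set.ofList (pvCanon nx ny nz x y z) := by
  unfold pvCell pvCanon
  rw [PySem.Set.ofList_eq_foldl]
  split_ifs <;> rfl

-- B's triple product entry carries exactly A's key and guarded-singleton list
lemma pvEntry3_eq (nx ny nz x y z : Int) :
    (fun p => (p.1, PySem.Set.ofList p.2))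
      (pvEntry (pvEntry (pvEntry 0 [] nx 1 x).1 (pvEntry 0 [] nx 1 x).2 ny nx y).1
        (pvEntry (pvEntry 0 [] nx 1 x).1 (pvEntry 0 [] nx 1 x).2 ny nx y).2 nz (nx * ny) z)
      = (pvNumber nx ny x y z, pvCell nx ny nz x y z) := by
  rw [pvCell_eq_ofList]
  have h : (pvEntry (pvEntry (pvEntry 0 [] nx 1 x).1 (pvEntry 0 [] nx 1 x).2 ny nx y).1
      (pvEntry (pvEntry 0 [] nx 1 x).1 (pvEntry 0 [] nx 1 x).2 ny nx y).2 nz (nx * ny) z)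
      = (pvNumber nx ny x y z, pvCanon nx ny nz x y z) := by
    simp only [pvEntry, pvCanon, pvNumber, pv_app_ite, List.map_nil, List.map_append,
      apply_ite (List.map (fun v : Int => v + nx * y)),
      apply_ite (List.map (fun v : Int => v + nx * ny * z)), List.map_cons,
      List.nil_append, Prod.mk.injEq]
    constructor
    · ring
    · simp only [List.append_assoc]
      ring_nf
  rw [h]

-- keys of the triple product list are distinct
lemma pv_keys3_nodup (nx ny nz : Int) :
    ((((PySem.List.pyRange 0 nx 1).map (pvEntry 0 [] nx 1)).flatMap (fun p =>
        ((PySem.List.pyRange 0 ny 1).map (pvEntry p.1 p.2 ny nx)))).flatMap (fun p =>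
        ((PySem.List.pyRange 0 nz 1).map (pvEntry p.1 p.2 nz (nx * ny))))).map Prod.fst
      |>.Nodup := by
  simp only [List.map_flatMap, List.map_map, List.flatMap_map, List.flatMap_assoc]
  have h : ((PySem.List.pyRange 0 nx 1).flatMap (fun x =>
      (PySem.List.pyRange 0 ny 1).flatMap (fun y =>
        (PySem.List.pyRange 0 nz 1).map (Prod.fst ∘ pvEntry
          (pvEntry (pvEntry 0 [] nx 1 x).1 (pvEntry 0 [] nx 1 x).2 ny nx y).1
          (pvEntry (pvEntry 0 [] nx 1 x).1 (pvEntry 0 [] nx 1 x).2 ny nx y).2 nz (nx * ny)))))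
      = ((List.range nx.toNat).flatMap (fun i =>
          (pvG2 ny.toNat nz.toNat).map (fun t => i + nx.toNat * t))).map (fun t : Nat => (t : Int)) := by
    rw [pv_pyRange_toNat nx, pv_pyRange_toNat ny, pv_pyRange_toNat nz]
    simp only [pvG2, List.map_flatMap, List.flatMap_map, List.map_map]
    refine List.flatMap_congr ?_
    intro i hi
    simp only [List.mem_range] at hi
    have ha : ((nx.toNat : Nat) : Int) = nx := by omega
    refine List.flatMap_congr ?_
    intro j hj
    simp only [List.mem_range] at hj
    have hb : ((ny.toNat : Nat) : Int) = ny := by omega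
    refine List.map_congr_left ?_
    intro k hk
    simp only [Function.comp, pvEntry_fst]
    push_cast
    rw [ha, hb]
    ring
  rw [h]
  exact (pv_nodup_g3 nx.toNat ny.toNat nz.toNat).map (fun t1 t2 ht => by omega)

lemma pv_keys1_nodup (nx : Int) :
    (((PySem.List.pyRange 0 nx 1).map (pvEntry 0 [] nx 1)).map Prod.fst).Nodup := by
  rw [pv_pyRange_toNat]
  simp only [List.map_map]
  refine List.nodup_range.map ?_
  intro k1 k2 h
  simp only [Function.comp, pvEntry_fst] at h
  omega

lemma pv_keys2_nodup (nx ny : Int) :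
    ((((PySem.List.pyRange 0 nx 1).map (pvEntry 0 [] nx 1)).flatMap (fun p =>
        ((PySem.List.pyRange 0 ny 1).map (pvEntry p.1 p.2 ny nx)))).map Prod.fst).Nodup := by
  simp only [List.map_flatMap, List.map_map, List.flatMap_map]
  have h : ((PySem.List.pyRange 0 nx 1).flatMap (fun x =>
      (PySem.List.pyRange 0 ny 1).map (Prod.fst ∘ pvEntry (pvEntry 0 [] nx 1 x).1 (pvEntry 0 [] nx 1 x).2 ny nx)))
      = (pvG2 nx.toNat ny.toNat).map (fun t : Nat => (t : Int)) := by
    rw [pv_pyRange_toNat nx, pv_pyRange_toNat ny]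
    simp only [pvG2, List.map_flatMap, List.flatMap_map, List.map_map]
    refine List.flatMap_congr ?_
    intro i hi
    simp only [List.mem_range] at hi
    have ha : ((nx.toNat : Nat) : Int) = nx := by omega
    refine List.map_congr_left ?_
    intro j hj
    simp only [Function.comp, pvEntry_fst]
    push_cast
    rw [ha]
    ring
  rw [h]
  exact (pv_nodup_g2 nx.toNat ny.toNat).map (fun t1 t2 ht => by omega)

-- on a degenerate grid A's dict stays empty
lemma pvA_degenerate (nx ny nz : Int) (h : nx ≤ 0 ∨ ny ≤ 0 ∨ nz ≤ 0) :
    make_mesh nx ny nz = [] := by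
  rw [pvA_shape]
  rcases h with h | h | h
  · rw [PySem.List.pyRange_one_eq_nil (by omega : nx ≤ 0)]
    rfl
  · rw [PySem.List.pyRange_one_eq_nil (by omega : ny ≤ 0)]
    have he : (PySem.List.pyRange 0 nx 1).flatMap
        (fun _ => ([] : List (Int × List Int))) = [] := by simp
    simp only [List.flatMap_nil, he]
    rfl
  · rw [PySem.List.pyRange_one_eq_nil (by omega : nz ≤ 0)]
    have he : (PySem.List.pyRange 0 nx 1).flatMap
        (fun _ => (PySem.List.pyRange 0 ny 1).flatMap
          (fun _ => ([] : List (Int × List Int)))) = [] := by simp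
    simp only [List.map_nil, he]
    rfl

-- ===== VERDICT (by name: the statement is the Claim_ definition above) =====
theorem make_mesh_spec : Claim_equal_make_mesh := by
  intro nx ny nz _
  unfold Spec_make_mesh
  by_cases hdeg : nx ≤ 0 ∨ ny ≤ 0 ∨ nz ≤ 0
  · rw [pvA_degenerate nx ny nz hdeg, make_mesh_alt, if_pos hdeg]
    rfl
  have hbase : ((PySem.Dict.empty : PySem.Dict Int (List Int)).insert 0 []).items
      = [((0 : Int), ([] : List Int))] := rfl
  have h1 : (pvProduct ((PySem.Dict.empty : PySem.Dict Int (List Int)).insert 0 []) nx 1).items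
      = (PySem.List.pyRange 0 nx 1).map (pvEntry 0 [] nx 1) := by
    rw [pvProduct_shape, hbase]
    simp only [List.flatMap_cons, List.flatMap_nil, List.append_nil]
    exact pv_items_foldl _ (pv_keys1_nodup nx)
  have h2 : (pvProduct (pvProduct ((PySem.Dict.empty : PySem.Dict Int (List Int)).insert 0 []) nx 1) ny nx).items
      = ((PySem.List.pyRange 0 nx 1).map (pvEntry 0 [] nx 1)).flatMap (fun p =>
          (PySem.List.pyRange 0 ny 1).map (pvEntry p.1 p.2 ny nx)) := by
    rw [pvProduct_shape, h1]
    exact pv_items_foldl _ (pv_keys2_nodup nx ny)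
  have h3 : (pvProduct (pvProduct (pvProduct ((PySem.Dict.empty : PySem.Dict Int (List Int)).insert 0 []) nx 1) ny nx) nz (nx * ny)).items
      = (((PySem.List.pyRange 0 nx 1).map (pvEntry 0 [] nx 1)).flatMap (fun p =>
          (PySem.List.pyRange 0 ny 1).map (pvEntry p.1 p.2 ny nx))).flatMap (fun p =>
          (PySem.List.pyRange 0 nz 1).map (pvEntry p.1 p.2 nz (nx * ny))) := by
    rw [pvProduct_shape, h2]
    exact pv_items_foldl _ (pv_keys3_nodup nx ny nz)
  have hB : make_mesh_alt nx ny nz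
      = ((((PySem.List.pyRange 0 nx 1).map (pvEntry 0 [] nx 1)).flatMap (fun p =>
          (PySem.List.pyRange 0 ny 1).map (pvEntry p.1 p.2 ny nx))).flatMap (fun p =>
          (PySem.List.pyRange 0 nz 1).map (pvEntry p.1 p.2 nz (nx * ny)))).map
          (fun p => (p.1, PySem.Set.ofList p.2)) := by
    rw [make_mesh_alt, if_neg hdeg]
    show ((pvProduct (pvProduct (pvProduct ((PySem.Dict.empty : PySem.Dict Int (List Int)).insert 0 []) nx 1) ny nx) nz (nx * ny)).items.foldl
        (fun d p => d.insert p.1 (PySem.Set.ofList p.2))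
        (PySem.Dict.empty : PySem.Dict Int (List Int))).items = _
    rw [h3]
    exact pv_items_foldl_conv _ (pv_keys3_nodup nx ny nz)
  have hconv : ((((PySem.List.pyRange 0 nx 1).map (pvEntry 0 [] nx 1)).flatMap (fun p =>
          (PySem.List.pyRange 0 ny 1).map (pvEntry p.1 p.2 ny nx))).flatMap (fun p =>
          (PySem.List.pyRange 0 nz 1).map (pvEntry p.1 p.2 nz (nx * ny)))).map
          (fun p => (p.1, PySem.Set.ofList p.2))
      = (PySem.List.pyRange 0 nx 1).flatMap (fun x =>
          (PySem.List.pyRange 0 ny 1).flatMap (fun y =>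
            (PySem.List.pyRange 0 nz 1).map (fun z =>
              (pvNumber nx ny x y z, pvCell nx ny nz x y z)))) := by
    simp only [List.map_flatMap, List.flatMap_map, List.flatMap_assoc, List.map_map]
    refine List.flatMap_congr ?_
    intro x _
    refine List.flatMap_congr ?_
    intro y _
    refine List.map_congr_left ?_
    intro z _
    exact pvEntry3_eq nx ny nz x y z
  have hKeysA : (((PySem.List.pyRange 0 nx 1).flatMap (fun x =>
          (PySem.List.pyRange 0 ny 1).flatMap (fun y =>
            (PySem.List.pyRange 0 nz 1).map (fun z =>
              (pvNumber nx ny x y z, pvCell nx ny nz x y z))))).map Prod.fst).Nodup := by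
    rw [← hconv]
    simp only [List.map_map]
    exact pv_keys3_nodup nx ny nz
  rw [pvA_shape, pv_items_foldl _ hKeysA, hB, hconv]
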